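-- pv_equiv track=rewrite | github.com/linolastella/CSC108H1---W2015 | A3/poetry_functions.py | should_rhyme
-- ===== SOURCE A (Python) =====
-- def should_rhyme(poem_lines, poetry_pattern):
--     """ (list of str, poetry pattern) -> list of tuples of int
--
--     Return a list of tuples of int where each tuple contains the indices of two
--     lines that should rhyme according to the poetry_pattern.
--
--     >>> poetry_pattern = ([0, 0, 0, 0, 0, 0], ['A', 'A', 'A', 'B', 'B', 'A'])
--     >>> poem_lines = ['first_line', 'second_line', 'third_line', 'fourth_line', 'fifth_line', 'sixth_line']
--     >>> should_rhyme(poem_lines, poetry_pattern)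
--     [(0, 1), (0, 2), (0, 5), (1, 2), (1, 5), (2, 5), (3, 4)]
--     """
--
--     should_rhyme_set = set()
--     scheme = poetry_pattern[1]
--
--     for i in range(len(scheme)):
--         j = i
--         while j < len(scheme):
--
--             # If this is True, then the two corresponding lines should rhyme.
--             if scheme[i] != '*' and scheme[j] != '*' and \
--                scheme[i] == scheme[j] and i != j:
--
--                 should_rhyme_set.add((i, j))
--             j += 1
--
--     should_rhyme_list = list(should_rhyme_set)
--     should_rhyme_list.sort()
--
--     return should_rhyme_list
-- ===== SOURCE B (Python) =====
-- def should_rhyme(poem_lines, poetry_pattern):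
--     """Group line indices by rhyme letter, emit the pairs inside each group,
--     then sort -- no quadratic scan over all index pairs."""
--     scheme = poetry_pattern[1]
--     items = [(letter, i) for i, letter in enumerate(scheme) if letter != '*']
--     groups = {}
--     for letter, i in items:
--         groups.setdefault(letter, []).append(i)
--     pairs = [(g[a], g[b]) for g in groups.values()
--              for a in range(len(g)) for b in range(a + 1, len(g))]
--     pairs.sort()
--     return pairs
-- ===== Notes on version B (the rewrite author's own statement) =====
-- stated objective: faster
-- what changed: Replaces the O(n^2) all-pairs scan with a set by grouping indices per rhyme letter in a dict and emitting only the intra-group pairs, then sorting.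
import Mathlib
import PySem

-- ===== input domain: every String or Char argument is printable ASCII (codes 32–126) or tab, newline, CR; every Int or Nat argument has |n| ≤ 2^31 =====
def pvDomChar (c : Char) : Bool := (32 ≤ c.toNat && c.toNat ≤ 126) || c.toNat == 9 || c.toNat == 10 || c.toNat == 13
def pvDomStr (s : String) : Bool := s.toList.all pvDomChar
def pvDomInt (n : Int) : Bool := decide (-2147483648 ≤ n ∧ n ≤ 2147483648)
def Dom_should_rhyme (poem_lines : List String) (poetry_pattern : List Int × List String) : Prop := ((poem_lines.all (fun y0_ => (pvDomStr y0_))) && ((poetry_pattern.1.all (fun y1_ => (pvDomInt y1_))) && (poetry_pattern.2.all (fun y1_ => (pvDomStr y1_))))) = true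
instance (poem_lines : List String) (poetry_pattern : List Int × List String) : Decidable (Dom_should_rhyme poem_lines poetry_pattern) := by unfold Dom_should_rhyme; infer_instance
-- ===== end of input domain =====

-- B groups the line indices by rhyme letter and emits only the intra-group pairs, then sorts,
-- instead of A's all-pairs double scan; return value only (neither version mutates its arguments).

-- ===== PORT A =====
-- the inner 'j = i; while j < len(scheme): …; j += 1' is ported as a fold over
-- pyRange i (len scheme) 1 — exactly the sequence of j values the while loop visits
def should_rhyme (poem_lines : List String) (poetry_pattern : List Int × List String) : List (Int × Int) :=
  let scheme := poetry_pattern.2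
  let n : Int := PySem.List.len scheme
  let should_rhyme_set : PySem.Set (Int × Int) :=
    (PySem.List.pyRange 0 n 1).foldl (fun st i =>
      (PySem.List.pyRange i n 1).foldl (fun st j =>
        if PySem.List.pyGetD scheme i "" ≠ "*" ∧ PySem.List.pyGetD scheme j "" ≠ "*" ∧
           PySem.List.pyGetD scheme i "" = PySem.List.pyGetD scheme j "" ∧ i ≠ j
        then PySem.Set.add st (i, j) else st) st) PySem.Set.empty
  -- list(set) then .sort(): the sorted set (order-independent)
  PySem.List.sorted2 should_rhyme_set Prod.fst Prod.snd false

-- ===== PORT B =====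
def should_rhyme_alt (poem_lines : List String) (poetry_pattern : List Int × List String) : List (Int × Int) :=
  let scheme := poetry_pattern.2
  let items : List (String × Int) :=
    ((PySem.List.enumerate scheme 0).filter (fun p => p.2 != "*")).map (fun p => (p.2, p.1))
  let groups : PySem.Dict String (List Int) :=
    items.foldl (fun d p => d.modify p.1 [] (fun l => l ++ [p.2])) PySem.Dict.empty
  let pairs : List (Int × Int) :=
    groups.values.flatMap (fun g =>
      (PySem.List.pyRange 0 (PySem.List.len g) 1).flatMap (fun a =>
        (PySem.List.pyRange (a + 1) (PySem.List.len g) 1).map (fun b =>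
          (PySem.List.pyGetD g a 0, PySem.List.pyGetD g b 0))))
  PySem.List.sorted2 pairs Prod.fst Prod.snd false

-- ===== PRECONDITION & SPEC =====
def Spec_should_rhyme (poem_lines : List String) (poetry_pattern : List Int × List String) (out : List (Int × Int)) : Prop := out = should_rhyme_alt poem_lines poetry_pattern
instance (poem_lines : List String) (poetry_pattern : List Int × List String) (out : List (Int × Int)) : Decidable (Spec_should_rhyme poem_lines poetry_pattern out) := by unfold Spec_should_rhyme; infer_instance

-- ===== CLAIM (what is proved, stated in full; the proofs are below) =====
def Claim_equal_should_rhyme : Prop := ∀ (poem_lines : List String) (poetry_pattern : List Int × List String), Dom_should_rhyme poem_lines poetry_pattern → Spec_should_rhyme poem_lines poetry_pattern (should_rhyme poem_lines poetry_pattern)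

-- ===== LEMMAS AND PROOFS =====

-- Python's lexicographic order on int pairs, as a Prop
def pvLexLt (a b : Int × Int) : Prop := a.1 < b.1 ∨ (a.1 = b.1 ∧ a.2 < b.2)

def pvLe (a b : Int × Int) : Prop := ¬ pvLexLt b a

-- the boolean comparator sorted2 … Prod.fst Prod.snd false uses
def pvBefore (a b : Int × Int) : Bool :=
  decide (a.1 < b.1) || (!decide (b.1 < a.1) && decide (a.2 < b.2))

lemma pvBefore_iff (a b : Int × Int) : pvBefore a b = true ↔ pvLexLt a b := by
  simp [pvBefore, pvLexLt]; omega

lemma pvLe_antisymm (a b : Int × Int) (h1 : pvLe a b) (h2 : pvLe b a) : a = b := by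
  rcases a with ⟨x1, y1⟩; rcases b with ⟨x2, y2⟩
  simp [pvLe, pvLexLt] at h1 h2
  have : x1 = x2 := by omega
  subst this
  simp_all; omega

lemma pvLexLt_trans {a b c : Int × Int} (h1 : pvLexLt a b) (h2 : pvLexLt b c) : pvLexLt a c := by
  simp only [pvLexLt] at *; omega

lemma pvLexLt_asymm {a b : Int × Int} (h : pvLexLt a b) : ¬ pvLexLt b a := by
  simp only [pvLexLt] at *; omega

lemma insertBy_pairwise (x : Int × Int) (l : List (Int × Int)) (h : l.Pairwise pvLe) :
    (PySem.List.insertBy pvBefore x l).Pairwise pvLe := by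
  induction l with
  | nil => simp [PySem.List.insertBy]
  | cons y ys ih =>
    rcases h with _ | ⟨hy, hys⟩
    by_cases hb : pvBefore x y = true
    · have hxy : pvLexLt x y := (pvBefore_iff x y).1 hb
      have heq : PySem.List.insertBy pvBefore x (y :: ys) = x :: y :: ys := by
        simp [PySem.List.insertBy, hb]
      rw [heq]
      refine List.Pairwise.cons ?_ (List.Pairwise.cons hy hys)
      intro z hz
      rcases List.mem_cons.1 hz with hz | hz
      · subst hz; exact pvLexLt_asymm hxy
      · intro hzx
        exact hy z hz (pvLexLt_trans hzx hxy)
    · have heq : PySem.List.insertBy pvBefore x (y :: ys) = y :: PySem.List.insertBy pvBefore x ys := by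
        simp [PySem.List.insertBy, hb]
      rw [heq]
      refine List.Pairwise.cons ?_ (ih hys)
      intro z hz
      rcases (PySem.List.mem_insertBy pvBefore x z ys).1 hz with hz | hz
      · rw [hz]
        intro hxy
        exact hb ((pvBefore_iff x y).2 hxy)
      · exact hy z hz

lemma foldl_insertBy_pairwise (xs : List (Int × Int)) :
    ∀ acc : List (Int × Int), acc.Pairwise pvLe →
      (xs.foldl (fun acc x => PySem.List.insertBy pvBefore x acc) acc).Pairwise pvLe := by
  induction xs with
  | nil => intro acc h; simpa using h
  | cons x xs ih =>
    intro acc h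
    exact ih _ (insertBy_pairwise x acc h)

lemma sorted2_pairwise (xs : List (Int × Int)) :
    (PySem.List.sorted2 xs Prod.fst Prod.snd false).Pairwise pvLe := by
  have : PySem.List.sorted2 xs Prod.fst Prod.snd false
      = xs.foldl (fun acc x => PySem.List.insertBy pvBefore x acc) [] := rfl
  rw [this]
  exact foldl_insertBy_pairwise xs [] (List.Pairwise.nil)

lemma sorted2_eq_of_perm (xs ys : List (Int × Int)) (h : xs.Perm ys) :
    PySem.List.sorted2 xs Prod.fst Prod.snd false = PySem.List.sorted2 ys Prod.fst Prod.snd false := by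
  apply List.Perm.eq_of_pairwise (le := pvLe)
  · intro a b _ _ h1 h2; exact pvLe_antisymm a b h1 h2
  · exact sorted2_pairwise xs
  · exact sorted2_pairwise ys
  · exact ((PySem.List.sorted2_perm xs Prod.fst Prod.snd false).trans h).trans
      (PySem.List.sorted2_perm ys Prod.fst Prod.snd false).symm

-- generic fold-membership and fold-nodup lemmas for the two accumulating loops
lemma mem_foldl_step {α β : Type} (g : List β → α → List β) (Q : α → β → Prop)
    (h : ∀ s a x, x ∈ g s a ↔ x ∈ s ∨ Q a x) :
    ∀ (l : List α) (s0 : List β) (x : β), x ∈ l.foldl g s0 ↔ x ∈ s0 ∨ ∃ a ∈ l, Q a x := by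
  intro l
  induction l with
  | nil => simp
  | cons a l ih =>
    intro s0 x
    simp only [List.foldl_cons, ih, h, List.mem_cons]
    constructor
    · rintro ((hx | hq) | ⟨b, hb, hq⟩)
      · exact Or.inl hx
      · exact Or.inr ⟨a, Or.inl rfl, hq⟩
      · exact Or.inr ⟨b, Or.inr hb, hq⟩
    · rintro (hx | ⟨b, (rfl | hb), hq⟩)
      · exact Or.inl (Or.inl hx)
      · exact Or.inl (Or.inr hq)
      · exact Or.inr ⟨b, hb, hq⟩

lemma nodup_foldl_step {α β : Type} (g : List β → α → List β)
    (h : ∀ s a, s.Nodup → (g s a).Nodup) :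
    ∀ (l : List α) (s0 : List β), s0.Nodup → (l.foldl g s0).Nodup := by
  intro l
  induction l with
  | nil => intro s0 h0; simpa using h0
  | cons a l ih => intro s0 h0; exact ih _ (h s0 a h0)


-- ---- characterisation of the pair (x, y) both programs collect ----
def pvP (scheme : List String) (p : Int × Int) : Prop :=
  0 ≤ p.1 ∧ p.1 < p.2 ∧ p.2 < PySem.List.len scheme ∧
  PySem.List.pyGetD scheme p.1 "" ≠ "*" ∧
  PySem.List.pyGetD scheme p.1 "" = PySem.List.pyGetD scheme p.2 ""

-- ---- A side ----
def pvCond (scheme : List String) (i j : Int) : Prop :=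
  PySem.List.pyGetD scheme i "" ≠ "*" ∧ PySem.List.pyGetD scheme j "" ≠ "*" ∧
  PySem.List.pyGetD scheme i "" = PySem.List.pyGetD scheme j "" ∧ i ≠ j

def pvSA (scheme : List String) : PySem.Set (Int × Int) :=
  (PySem.List.pyRange 0 (PySem.List.len scheme) 1).foldl (fun st i =>
    (PySem.List.pyRange i (PySem.List.len scheme) 1).foldl (fun st j =>
      if PySem.List.pyGetD scheme i "" ≠ "*" ∧ PySem.List.pyGetD scheme j "" ≠ "*" ∧
         PySem.List.pyGetD scheme i "" = PySem.List.pyGetD scheme j "" ∧ i ≠ j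
      then PySem.Set.add st (i, j) else st) st) PySem.Set.empty

lemma portA_eq (poem_lines : List String) (poetry_pattern : List Int × List String) :
    should_rhyme poem_lines poetry_pattern
      = PySem.List.sorted2 (pvSA poetry_pattern.2) Prod.fst Prod.snd false := rfl

lemma memA_inner (scheme : List String) (i : Int) (s : PySem.Set (Int × Int)) (x : Int × Int) :
    x ∈ (PySem.List.pyRange i (PySem.List.len scheme) 1).foldl (fun st j =>
        if PySem.List.pyGetD scheme i "" ≠ "*" ∧ PySem.List.pyGetD scheme j "" ≠ "*" ∧
           PySem.List.pyGetD scheme i "" = PySem.List.pyGetD scheme j "" ∧ i ≠ j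
        then PySem.Set.add st (i, j) else st) s
      ↔ x ∈ s ∨ ∃ j, i ≤ j ∧ j < PySem.List.len scheme ∧ pvCond scheme i j ∧ x = (i, j) := by
  rw [mem_foldl_step _ (fun j x => pvCond scheme i j ∧ x = (i, j)) ?_]
  · constructor
    · rintro (hx | ⟨j, hj, hc, rfl⟩)
      · exact Or.inl hx
      · rcases PySem.List.mem_pyRange_one.1 hj with ⟨h1, h2⟩
        exact Or.inr ⟨j, h1, h2, hc, rfl⟩
    · rintro (hx | ⟨j, h1, h2, hc, rfl⟩)
      · exact Or.inl hx
      · exact Or.inr ⟨j, PySem.List.mem_pyRange_one.2 ⟨h1, h2⟩, hc, rfl⟩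
  · intro s j x
    simp only [pvCond]
    split_ifs with hc
    · rw [PySem.Set.mem_add]; tauto
    · tauto

lemma memA (scheme : List String) (p : Int × Int) :
    p ∈ pvSA scheme ↔ pvP scheme p := by
  unfold pvSA
  rw [mem_foldl_step _
      (fun i x => ∃ j, i ≤ j ∧ j < PySem.List.len scheme ∧ pvCond scheme i j ∧ x = (i, j))
      (fun s i x => memA_inner scheme i s x)]
  simp only [PySem.Set.empty, List.not_mem_nil, false_or]
  constructor
  · rintro ⟨i, hi, j, h1, h2, hc, rfl⟩
    rcases PySem.List.mem_pyRange_one.1 hi with ⟨hi0, hin⟩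
    rcases hc with ⟨hne, _, heq, hij⟩
    exact ⟨hi0, by omega, h2, hne, heq⟩
  · rintro ⟨h0, hlt, hn, hne, heq⟩
    refine ⟨p.1, PySem.List.mem_pyRange_one.2 ⟨h0, by omega⟩,
      p.2, by omega, hn, ⟨hne, ?_, heq, by omega⟩, rfl⟩
    rw [← heq]; exact hne

lemma nodupA (scheme : List String) : (pvSA scheme).Nodup := by
  unfold pvSA
  apply nodup_foldl_step
  · intro s i hs
    apply nodup_foldl_step _ ?_ _ _ hs
    intro s' j hs'
    split_ifs with hc
    · exact PySem.Set.nodup_add s' (i, j) hs'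
    · exact hs'
  · exact List.nodup_nil

-- ---- B side ----
def pvItems (scheme : List String) : List (String × Int) :=
  ((PySem.List.enumerate scheme 0).filter (fun p => p.2 != "*")).map (fun p => (p.2, p.1))

def pvGroups (scheme : List String) : PySem.Dict String (List Int) :=
  (pvItems scheme).foldl (fun d p => d.modify p.1 [] (fun l => l ++ [p.2])) PySem.Dict.empty

def pvGrp (scheme : List String) (c : String) : List Int := (pvGroups scheme).getD c []

def pvPairsOf (g : List Int) : List (Int × Int) :=
  (PySem.List.pyRange 0 (PySem.List.len g) 1).flatMap (fun a =>
    (PySem.List.pyRange (a + 1) (PySem.List.len g) 1).map (fun b =>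
      (PySem.List.pyGetD g a 0, PySem.List.pyGetD g b 0)))

def pvPairs (scheme : List String) : List (Int × Int) :=
  (pvGroups scheme).values.flatMap pvPairsOf

lemma portB_eq (poem_lines : List String) (poetry_pattern : List Int × List String) :
    should_rhyme_alt poem_lines poetry_pattern
      = PySem.List.sorted2 (pvPairs poetry_pattern.2) Prod.fst Prod.snd false := rfl

lemma grp_eq (scheme : List String) (c : String) :
    pvGrp scheme c
      = ((PySem.List.enumerate scheme 0).filter
          (fun e => (e.2 == c) && (e.2 != "*"))).map Prod.fst := by
  unfold pvGrp pvGroups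
  rw [PySem.Dict.getD_foldl_modify_append]
  simp [pvItems, List.filter_map, List.filter_filter, Function.comp_def, List.map_map]

lemma grp_pairwise (scheme : List String) (c : String) :
    (pvGrp scheme c).Pairwise (· < ·) := by
  rw [grp_eq]
  apply List.Pairwise.map
  · intro a b h; exact h
  · exact List.Pairwise.filter _ (PySem.List.pairwise_lt_enumerate scheme 0)

lemma grp_mem (scheme : List String) (c : String) (x : Int) :
    x ∈ pvGrp scheme c ↔
      ∃ (k : Nat) (h : k < scheme.length), x = (k : Int) ∧ scheme[k] = c ∧ scheme[k] ≠ "*" := by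
  rw [grp_eq]
  simp only [List.mem_map, List.mem_filter, PySem.List.mem_enumerate_iff]
  constructor
  · rintro ⟨e, ⟨⟨k, hk, rfl⟩, hpred⟩, rfl⟩
    simp only [Bool.and_eq_true, beq_iff_eq, bne_iff_ne, ne_eq] at hpred
    exact ⟨k, hk, by simp, hpred.1, hpred.2⟩
  · rintro ⟨k, hk, rfl, hc, hne⟩
    subst hc
    refine ⟨((k : Int), scheme[k]), ⟨⟨k, hk, by simp⟩, ?_⟩, rfl⟩
    simp [hne]

lemma keys_eq (scheme : List String) :
    (pvGroups scheme).keys = PySem.Set.ofList ((pvItems scheme).map Prod.fst) := by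
  unfold pvGroups
  rw [PySem.Dict.keys_foldl_modify_key (pvItems scheme) Prod.fst [] (fun _ p => (fun l => l ++ [p.2]))]
  rfl

lemma nodup_keys (scheme : List String) : (pvGroups scheme).keys.Nodup := by
  rw [keys_eq]; exact PySem.Set.nodup_ofList _

lemma mem_keys (scheme : List String) (c : String) :
    c ∈ (pvGroups scheme).keys ↔
      ∃ (k : Nat) (h : k < scheme.length), scheme[k] = c ∧ scheme[k] ≠ "*" := by
  rw [keys_eq, PySem.Set.mem_ofList]
  simp only [pvItems, List.mem_map, List.mem_filter, PySem.List.mem_enumerate_iff]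
  constructor
  · rintro ⟨q, ⟨e, ⟨⟨k, hk, rfl⟩, hpred⟩, rfl⟩, rfl⟩
    simp only [bne_iff_ne, ne_eq] at hpred
    exact ⟨k, hk, rfl, hpred⟩
  · rintro ⟨k, hk, rfl, hne⟩
    exact ⟨(scheme[k], (k : Int)), ⟨((k : Int), scheme[k]), ⟨⟨k, hk, by simp⟩, by simpa using hne⟩, rfl⟩, rfl⟩

lemma values_eq (scheme : List String) :
    (pvGroups scheme).values = (pvGroups scheme).keys.map (fun c => pvGrp scheme c) :=
  PySem.Dict.values_eq_map_keys _ (nodup_keys scheme) []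

lemma mem_pairsOf (g : List Int) (p : Int × Int) :
    p ∈ pvPairsOf g ↔ ∃ (a b : Nat) (ha : a < g.length) (hb : b < g.length),
      a < b ∧ p = (g[a], g[b]) := by
  simp only [pvPairsOf, List.mem_flatMap, List.mem_map, PySem.List.mem_pyRange_one,
    PySem.List.len_eq]
  constructor
  · rintro ⟨a, ⟨ha0, han⟩, b, ⟨hab, hbn⟩, rfl⟩
    refine ⟨a.toNat, b.toNat, by omega, by omega, by omega, ?_⟩
    rw [PySem.List.pyGetD_eq_getElem g 0 ha0 han,
        PySem.List.pyGetD_eq_getElem g 0 (by omega) hbn]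
  · rintro ⟨a, b, ha, hb, hab, rfl⟩
    refine ⟨(a : Int), ⟨by omega, by omega⟩, (b : Int), ⟨by omega, by omega⟩, ?_⟩
    rw [PySem.List.pyGetD_eq_getElem g 0 (by omega) (by exact_mod_cast ha),
        PySem.List.pyGetD_eq_getElem g 0 (by omega) (by exact_mod_cast hb)]
    simp

lemma nodup_pairsOf (g : List Int) (hg : g.Pairwise (· < ·)) : (pvPairsOf g).Nodup := by
  have hmono := List.pairwise_iff_getElem.mp hg
  have hinj : ∀ (a b : Nat) (ha : a < g.length) (hb : b < g.length), g[a] = g[b] → a = b := by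
    intro a b ha hb he
    rcases Nat.lt_trichotomy a b with h | h | h
    · exact absurd he (by have := hmono a b ha hb h; omega)
    · exact h
    · exact absurd he (by have := hmono b a hb ha h; omega)
  unfold pvPairsOf
  rw [List.nodup_flatMap]
  constructor
  · intro a ha
    rcases PySem.List.mem_pyRange_one.1 ha with ⟨ha0, han⟩
    rw [PySem.List.len_eq] at han
    apply List.Nodup.map_on ?_ (PySem.List.nodup_pyRange_one _ _)
    intro b1 hb1 b2 hb2 he
    rcases PySem.List.mem_pyRange_one.1 hb1 with ⟨hb10, hb1n⟩
    rcases PySem.List.mem_pyRange_one.1 hb2 with ⟨hb20, hb2n⟩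
    rw [PySem.List.len_eq] at hb1n hb2n
    have h2 := congrArg Prod.snd he
    simp only at h2
    rw [PySem.List.pyGetD_eq_getElem g 0 (by omega) hb1n,
        PySem.List.pyGetD_eq_getElem g 0 (by omega) hb2n] at h2
    have := hinj _ _ (by omega) (by omega) h2
    omega
  · apply List.Pairwise.imp_of_mem ?_ (PySem.List.nodup_pyRange_one 0 (PySem.List.len g))
    intro a a' ha ha' hne p hp hp'
    rcases PySem.List.mem_pyRange_one.1 ha with ⟨ha0, han⟩
    rcases PySem.List.mem_pyRange_one.1 ha' with ⟨ha0', han'⟩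
    rw [PySem.List.len_eq] at han han'
    rcases List.mem_map.1 hp with ⟨b, hb, rfl⟩
    rcases List.mem_map.1 hp' with ⟨b', hb', he⟩
    have h1 := congrArg Prod.fst he
    simp only at h1
    rw [PySem.List.pyGetD_eq_getElem g 0 (by omega) (by omega),
        PySem.List.pyGetD_eq_getElem g 0 (by omega) (by omega)] at h1
    have := hinj _ _ (by omega) (by omega) h1.symm
    omega

lemma grp_getElem_letter (scheme : List String) (c : String) (x : Int)
    (hx : x ∈ pvGrp scheme c) :
    0 ≤ x ∧ x < PySem.List.len scheme ∧ PySem.List.pyGetD scheme x "" = c ∧ c ≠ "*" := by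
  rcases (grp_mem scheme c x).1 hx with ⟨k, hk, rfl, hc, hne⟩
  rw [PySem.List.len_eq]
  refine ⟨by omega, by exact_mod_cast hk, ?_, by rw [← hc]; exact hne⟩
  rw [PySem.List.pyGetD_eq_getElem scheme "" (by omega) (by exact_mod_cast hk)]
  simpa using hc

lemma mem_pairs (scheme : List String) (p : Int × Int) :
    p ∈ pvPairs scheme ↔ pvP scheme p := by
  unfold pvPairs
  rw [values_eq, List.flatMap_map]
  simp only [List.mem_flatMap]
  constructor
  · rintro ⟨c, hc, hp⟩
    rcases (mem_pairsOf _ p).1 hp with ⟨a, b, ha, hb, hab, rfl⟩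
    have hxa := grp_getElem_letter scheme c _ (List.getElem_mem ha)
    have hxb := grp_getElem_letter scheme c _ (List.getElem_mem hb)
    have hlt := List.pairwise_iff_getElem.mp (grp_pairwise scheme c) a b ha hb hab
    exact ⟨hxa.1, hlt, hxb.2.1, by rw [hxa.2.2.1]; exact hxa.2.2.2,
      by rw [hxa.2.2.1, hxb.2.2.1]⟩
  · rintro ⟨h0, hlt, hn, hne, heq⟩
    rw [PySem.List.len_eq] at hn
    have hx1 : p.1.toNat < scheme.length := by omega
    have hx2 : p.2.toNat < scheme.length := by omega
    have e1 : PySem.List.pyGetD scheme p.1 "" = scheme[p.1.toNat] :=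
      PySem.List.pyGetD_eq_getElem scheme "" (by omega) (by omega)
    have e2 : PySem.List.pyGetD scheme p.2 "" = scheme[p.2.toNat] :=
      PySem.List.pyGetD_eq_getElem scheme "" (by omega) (by omega)
    set c := scheme[p.1.toNat] with hcdef
    have hcne : c ≠ "*" := by rw [← e1]; exact hne
    have hmem1 : p.1 ∈ pvGrp scheme c :=
      (grp_mem scheme c p.1).2 ⟨p.1.toNat, hx1, by omega, rfl, hcne⟩
    have hmem2 : p.2 ∈ pvGrp scheme c := by
      refine (grp_mem scheme c p.2).2 ⟨p.2.toNat, hx2, by omega, ?_, ?_⟩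
      · rw [← e2, ← heq, e1]
      · rw [← e2, ← heq, e1]; exact hcne
    have hkey : c ∈ (pvGroups scheme).keys :=
      (mem_keys scheme c).2 ⟨p.1.toNat, hx1, rfl, hcne⟩
    refine ⟨c, hkey, ?_⟩
    rcases List.mem_iff_getElem.1 hmem1 with ⟨a, ha, hga⟩
    rcases List.mem_iff_getElem.1 hmem2 with ⟨b, hb, hgb⟩
    have hmono := List.pairwise_iff_getElem.mp (grp_pairwise scheme c)
    have hab : a < b := by
      rcases Nat.lt_trichotomy a b with h | h | h
      · exact h
      · subst h; rw [hga] at hgb; omega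
      · have := hmono b a hb ha h; omega
    exact (mem_pairsOf _ p).2 ⟨a, b, ha, hb, hab, by rw [hga, hgb]⟩

lemma nodup_pairs (scheme : List String) : (pvPairs scheme).Nodup := by
  unfold pvPairs
  rw [values_eq, List.flatMap_map, List.nodup_flatMap]
  constructor
  · intro c _; exact nodup_pairsOf _ (grp_pairwise scheme c)
  · apply List.Pairwise.imp_of_mem ?_ (nodup_keys scheme)
    intro c c' _ _ hne p hp hp'
    rcases (mem_pairsOf _ p).1 hp with ⟨a, b, ha, hb, hab, rfl⟩
    rcases (mem_pairsOf _ _).1 hp' with ⟨a', b', ha', hb', hab', he⟩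
    have h1 := grp_getElem_letter scheme c _ (List.getElem_mem ha)
    have h2 := grp_getElem_letter scheme c' _ (List.getElem_mem ha')
    have hfst := congrArg Prod.fst he
    simp only at hfst
    rw [← hfst] at h2
    exact hne (h1.2.2.1.symm.trans h2.2.2.1)

-- ===== VERDICT (by name: the statement is the Claim_ definition above) =====
theorem should_rhyme_spec : Claim_equal_should_rhyme := by
  intro poem_lines poetry_pattern _
  show should_rhyme poem_lines poetry_pattern = should_rhyme_alt poem_lines poetry_pattern
  rw [portA_eq, portB_eq]
  apply sorted2_eq_of_perm
  rw [List.perm_ext_iff_of_nodup (nodupA _) (nodup_pairs _)]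
  intro p
  rw [memA, mem_pairs]
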